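-- pv_equiv track=rewrite | github.com/pypi-data/pypi-mirror-404 | packages/miesc/miesc-5.0.1.tar.gz/miesc-5.0.1/src/agents/crewai_coordinator.py | _parse_findings_from_text
-- ===== SOURCE A (Python) =====
-- from typing import Dict, Any, List, Optional
--
-- def _parse_findings_from_text(text: str) -> List[Dict[str, Any]]:
--     """Parse findings from CrewAI text output"""
--
--     findings = []
--
--     # Simple parsing - look for severity indicators
--     lines = text.split('\n')
--
--     current_finding = {}
--     for line in lines:
--         line = line.strip()
--
--         # Look for severity indicators
--         if 'critical' in line.lower():
--             if current_finding:
--                 findings.append(current_finding)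
--             current_finding = {'severity': 'Critical', 'description': line}
--         elif 'high' in line.lower() and 'severity' in line.lower():
--             if current_finding:
--                 findings.append(current_finding)
--             current_finding = {'severity': 'High', 'description': line}
--         elif 'medium' in line.lower() and 'severity' in line.lower():
--             if current_finding:
--                 findings.append(current_finding)
--             current_finding = {'severity': 'Medium', 'description': line}
--         elif current_finding:
--             # Add to current finding description
--             current_finding['description'] = current_finding.get('description', '') + ' ' + line
--
--     if current_finding:
--         findings.append(current_finding)
--
--     # Add metadata to each finding
--     for idx, finding in enumerate(findings):
--         finding['id'] = f"CREW-{idx+1:03d}"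
--         finding['source'] = 'CrewAI'
--         finding['category'] = 'Multi-Agent Analysis'
--         finding.setdefault('severity', 'Medium')
--         finding.setdefault('description', 'Finding detected by multi-agent crew')
--
--     return findings
-- ===== SOURCE B (Python) =====
-- def _severity_label(line):
--     low = line.lower()
--     if 'critical' in low:
--         return 'Critical'
--     if 'severity' in low:
--         if 'high' in low:
--             return 'High'
--         if 'medium' in low:
--             return 'Medium'
--     return None
--
-- def _segments(lines):
--     # drop preamble lines before the first labeled line
--     while lines and _severity_label(lines[0]) is None:
--         lines = lines[1:]
--     if not lines:
--         return []
--     sev = _severity_label(lines[0])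
--     body, rest = [lines[0]], lines[1:]
--     while rest and _severity_label(rest[0]) is None:
--         body = body + [rest[0]]
--         rest = rest[1:]
--     return [(sev, ' '.join(body))] + _segments(rest)
--
-- def _parse_findings_from_text(text):
--     """Recursive segmentation: split stripped lines into labeled segments, then format."""
--     lines = [ln.strip() for ln in text.split('\n')]
--     return [{'severity': sev,
--              'description': desc,
--              'id': 'CREW-%03d' % (k + 1),
--              'source': 'CrewAI',
--              'category': 'Multi-Agent Analysis'}
--             for k, (sev, desc) in enumerate(_segments(lines))]
-- ===== Notes on version B (the rewrite author's own statement) =====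
-- stated objective: simpler
-- what changed: A's single stateful pass that mutates a current-finding dict and flushes it on each severity boundary is replaced by a recursive segmentation (drop the unlabeled preamble, span each segment's body, join it with ' ') followed by a plain formatting map that builds each finding dict in one literal.
import Mathlib
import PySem

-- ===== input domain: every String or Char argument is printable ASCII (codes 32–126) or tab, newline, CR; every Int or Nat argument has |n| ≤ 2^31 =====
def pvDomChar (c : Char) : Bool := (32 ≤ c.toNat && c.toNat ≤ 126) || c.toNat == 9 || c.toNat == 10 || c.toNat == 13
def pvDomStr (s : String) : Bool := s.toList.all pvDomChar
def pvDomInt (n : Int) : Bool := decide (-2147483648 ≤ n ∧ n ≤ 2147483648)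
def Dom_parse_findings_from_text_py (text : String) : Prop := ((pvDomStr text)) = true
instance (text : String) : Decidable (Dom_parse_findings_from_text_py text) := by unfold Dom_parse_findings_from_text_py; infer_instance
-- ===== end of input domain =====

-- B replaces A's stateful dict-mutating single pass by a recursive segmentation (skip preamble,
-- span each segment, join it) followed by a formatting map: a simpler decomposition, same values.

-- ===== PORT A =====
-- one iteration of A's 'for line in lines' loop; state = (findings, current_finding)
def pvAStep (st : List (PySem.Dict String String) × PySem.Dict String String) (line0 : String) :
    List (PySem.Dict String String) × PySem.Dict String String :=
  let line := PySem.Str.strip line0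
  if PySem.Str.isIn "critical" (PySem.Str.lower line) then
    (if st.2.size ≠ 0 then st.1 ++ [st.2] else st.1,
     PySem.Dict.ofList [("severity", "Critical"), ("description", line)])
  else if PySem.Str.isIn "high" (PySem.Str.lower line) && PySem.Str.isIn "severity" (PySem.Str.lower line) then
    (if st.2.size ≠ 0 then st.1 ++ [st.2] else st.1,
     PySem.Dict.ofList [("severity", "High"), ("description", line)])
  else if PySem.Str.isIn "medium" (PySem.Str.lower line) && PySem.Str.isIn "severity" (PySem.Str.lower line) then
    (if st.2.size ≠ 0 then st.1 ++ [st.2] else st.1,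
     PySem.Dict.ofList [("severity", "Medium"), ("description", line)])
  else if st.2.size ≠ 0 then
    (st.1, st.2.insert "description" (st.2.getD "description" "" ++ " " ++ line))
  else st

-- A's metadata loop body: finding['id'] = f"CREW-{idx+1:03d}" etc., then the two setdefaults
def pvAMeta (p : Int × PySem.Dict String String) : PySem.Dict String String :=
  ((((p.2.insert "id" ("CREW-" ++ PySem.Str.zfill (PySem.Int.toStr (p.1 + 1)) 3)).insert
        "source" "CrewAI").insert "category" "Multi-Agent Analysis").setdefault "severity"
      "Medium").setdefault "description" "Finding detected by multi-agent crew"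

def parse_findings_from_text_py (text : String) : List (List (String × String)) :=
  let lines := (PySem.Str.split? text "\n").getD []
  let st := lines.foldl pvAStep ([], PySem.Dict.empty)
  let findings := if st.2.size ≠ 0 then st.1 ++ [st.2] else st.1
  ((PySem.List.enumerate findings).map pvAMeta).map (·.items)

-- ===== PORT B =====
def pvSeverityLabel (line : String) : Option String :=
  let low := PySem.Str.lower line
  if PySem.Str.isIn "critical" low then some "Critical"
  else if PySem.Str.isIn "severity" low then
    if PySem.Str.isIn "high" low then some "High"
    else if PySem.Str.isIn "medium" low then some "Medium"
    else none
  else none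

-- Source B's first while loop: drop preamble lines before the first labeled line
def pvDropPre : List String → List String
  | [] => []
  | l :: ls => if (pvSeverityLabel l).isNone then pvDropPre ls else l :: ls

-- Source B's second while loop: move unlabeled lines from rest into body
def pvBodyRest (body : List String) : List String → List String × List String
  | [] => (body, [])
  | l :: ls => if (pvSeverityLabel l).isNone then pvBodyRest (body ++ [l]) ls else (body, l :: ls)

theorem pvDropPre_length_le (ls : List String) : (pvDropPre ls).length ≤ ls.length := by
  induction ls with
  | nil => simp [pvDropPre]
  | cons l ls ih => simp only [pvDropPre]; split <;> simp <;> omega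

theorem pvBodyRest_snd_length_le (rest : List String) : ∀ body, (pvBodyRest body rest).2.length ≤ rest.length := by
  induction rest with
  | nil => simp [pvBodyRest]
  | cons l ls ih =>
    intro body
    simp only [pvBodyRest]; split
    · exact le_trans (ih _) (by simp)
    · simp

def pvSegments (lines0 : List String) : List (String × String) :=
  match h : pvDropPre lines0 with
  | [] => []
  | l :: ls =>
    let br := pvBodyRest [l] ls
    ((pvSeverityLabel l).getD "", PySem.Str.join " " br.1) :: pvSegments br.2
termination_by lines0.length
decreasing_by
  have h1 := pvDropPre_length_le lines0
  rw [h] at h1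
  have h2 := pvBodyRest_snd_length_le ls [l]
  simp at h1
  omega

def parse_findings_from_text_py_alt (text : String) : List (List (String × String)) :=
  let lines := ((PySem.Str.split? text "\n").getD []).map PySem.Str.strip
  (PySem.List.enumerate (pvSegments lines)).map fun q =>
    [("severity", q.2.1), ("description", q.2.2),
     ("id", "CREW-" ++ PySem.Str.zfill (PySem.Int.toStr (q.1 + 1)) 3),
     ("source", "CrewAI"), ("category", "Multi-Agent Analysis")]

-- ===== PRECONDITION & SPEC =====
def Spec_parse_findings_from_text_py (text : String) (out : List (List (String × String))) : Prop := out = parse_findings_from_text_py_alt text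
instance (text : String) (out : List (List (String × String))) : Decidable (Spec_parse_findings_from_text_py text out) := by unfold Spec_parse_findings_from_text_py; infer_instance

-- ===== CLAIM (what is proved, stated in full; the proofs are below) =====
def Claim_equal_parse_findings_from_text_py : Prop := ∀ (text : String), Dom_parse_findings_from_text_py text → Spec_parse_findings_from_text_py text (parse_findings_from_text_py text)

-- ===== LEMMAS AND PROOFS =====

-- the dict A keeps as current_finding always has exactly this shape
def pvDictOf (p : String × String) : PySem.Dict String String :=
  PySem.Dict.ofList [("severity", p.1), ("description", p.2)]

def pvOcur : Option (String × String) → PySem.Dict String String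
  | none => PySem.Dict.empty
  | some p => pvDictOf p

-- A's loop body on an already-stripped line, branch structure folded through pvSeverityLabel
def pvCleanStep (st : List (PySem.Dict String String) × PySem.Dict String String) (line : String) :
    List (PySem.Dict String String) × PySem.Dict String String :=
  match pvSeverityLabel line with
  | some sev => (if st.2.size ≠ 0 then st.1 ++ [st.2] else st.1, pvDictOf (sev, line))
  | none =>
    if st.2.size ≠ 0 then
      (st.1, st.2.insert "description" (st.2.getD "description" "" ++ " " ++ line))
    else st

-- reference semantics of A's loop: the (severity, description) segments it accumulates
def pvSegsFrom : Option (String × String) → List String → List (String × String)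
  | cur, [] => cur.toList
  | cur, l :: L =>
    match pvSeverityLabel l with
    | some sev => cur.toList ++ pvSegsFrom (some (sev, l)) L
    | none =>
      match cur with
      | some p => pvSegsFrom (some (p.1, p.2 ++ " " ++ l)) L
      | none => pvSegsFrom none L

def pvFive (i : Int) (p : String × String) : List (String × String) :=
  [("severity", p.1), ("description", p.2),
   ("id", "CREW-" ++ PySem.Str.zfill (PySem.Int.toStr (i + 1)) 3),
   ("source", "CrewAI"), ("category", "Multi-Agent Analysis")]

theorem pvAStep_eq (st : List (PySem.Dict String String) × PySem.Dict String String) (l0 : String) :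
    pvAStep st l0 = pvCleanStep st (PySem.Str.strip l0) := by
  simp only [pvAStep, pvCleanStep, pvSeverityLabel, pvDictOf]
  cases hc : PySem.Str.isIn "critical" (PySem.Str.lower (PySem.Str.strip l0)) <;>
  cases hs : PySem.Str.isIn "severity" (PySem.Str.lower (PySem.Str.strip l0)) <;>
  cases hh : PySem.Str.isIn "high" (PySem.Str.lower (PySem.Str.strip l0)) <;>
  cases hm : PySem.Str.isIn "medium" (PySem.Str.lower (PySem.Str.strip l0)) <;>
  simp [hc, hs, hh, hm]

theorem pvDictOf_size (p : String × String) : (pvDictOf p).size = 2 := by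
  simp [pvDictOf, PySem.Dict.ofList, PySem.Dict.update, PySem.Dict.insert, PySem.Dict.empty,
    PySem.Dict.contains, PySem.Dict.size]

theorem pvDictOf_getD (p : String × String) :
    (pvDictOf p).getD "description" "" = p.2 := by
  simp [pvDictOf, PySem.Dict.ofList, PySem.Dict.update, PySem.Dict.insert, PySem.Dict.empty,
    PySem.Dict.contains, PySem.Dict.getD, PySem.Dict.get?]

theorem pvDictOf_insert (p : String × String) (v : String) :
    (pvDictOf p).insert "description" v = pvDictOf (p.1, v) := by
  apply PySem.Dict.ext
  simp [pvDictOf, PySem.Dict.ofList, PySem.Dict.update, PySem.Dict.insert, PySem.Dict.empty,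
    PySem.Dict.contains, PySem.Dict.items]

theorem pvAMeta_items (i : Int) (p : String × String) :
    (pvAMeta (i, pvDictOf p)).items = pvFive i p := by
  simp [pvAMeta, pvFive, pvDictOf, PySem.Dict.ofList, PySem.Dict.update, PySem.Dict.insert,
    PySem.Dict.empty, PySem.Dict.contains, PySem.Dict.setdefault, PySem.Dict.items]

-- A's whole loop (including the trailing flush) computes the segments of pvSegsFrom
theorem pvFoldA (L : List String) : ∀ (fs : List (String × String)) (cur : Option (String × String)),
    (if (L.foldl pvCleanStep (fs.map pvDictOf, pvOcur cur)).2.size ≠ 0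
     then (L.foldl pvCleanStep (fs.map pvDictOf, pvOcur cur)).1 ++
            [(L.foldl pvCleanStep (fs.map pvDictOf, pvOcur cur)).2]
     else (L.foldl pvCleanStep (fs.map pvDictOf, pvOcur cur)).1)
    = (fs ++ pvSegsFrom cur L).map pvDictOf := by
  induction L with
  | nil =>
    intro fs cur
    cases cur with
    | none => simp [pvOcur, pvSegsFrom, PySem.Dict.size_empty]
    | some p => simp [pvOcur, pvSegsFrom, pvDictOf_size]
  | cons l L ih =>
    intro fs cur
    rw [List.foldl_cons]
    cases hl : pvSeverityLabel l with
    | some sev =>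
      cases cur with
      | none =>
        have : pvCleanStep (fs.map pvDictOf, pvOcur none) l = (fs.map pvDictOf, pvOcur (some (sev, l))) := by
          simp [pvCleanStep, hl, pvOcur, PySem.Dict.size_empty]
        rw [this, ih fs (some (sev, l))]
        simp [pvSegsFrom, hl]
      | some p =>
        have : pvCleanStep (fs.map pvDictOf, pvOcur (some p)) l
            = ((fs ++ [p]).map pvDictOf, pvOcur (some (sev, l))) := by
          simp [pvCleanStep, hl, pvOcur, pvDictOf_size]
        rw [this, ih (fs ++ [p]) (some (sev, l))]
        simp [pvSegsFrom, hl]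
    | none =>
      cases cur with
      | none =>
        have : pvCleanStep (fs.map pvDictOf, pvOcur none) l = (fs.map pvDictOf, pvOcur none) := by
          simp [pvCleanStep, hl, pvOcur, PySem.Dict.size_empty]
        rw [this, ih fs none]
        simp [pvSegsFrom, hl]
      | some p =>
        have : pvCleanStep (fs.map pvDictOf, pvOcur (some p)) l
            = (fs.map pvDictOf, pvOcur (some (p.1, p.2 ++ " " ++ l))) := by
          simp [pvCleanStep, hl, pvOcur, pvDictOf_size, pvDictOf_getD, pvDictOf_insert]
        rw [this, ih fs (some (p.1, p.2 ++ " " ++ l))]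
        simp [pvSegsFrom, hl]

theorem pvEnumerate_map {α β : Type} (xs : List α) (f : α → β) :
    ∀ s : Int, PySem.List.enumerate (xs.map f) s
      = (PySem.List.enumerate xs s).map (fun p => (p.1, f p.2)) := by
  induction xs with
  | nil => intro s; simp [PySem.List.enumerate_nil]
  | cons x xs ih => intro s; simp [PySem.List.enumerate_cons, ih]

-- ' '.join at the List Char level is the fold A performs
theorem pvStrJoinFold (xs : List String) : ∀ x : String,
    PySem.Str.join " " (x :: xs) = xs.foldl (fun a b => a ++ " " ++ b) x := by
  induction xs with
  | nil =>
    intro x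
    rw [← String.toList_inj]
    simp [PySem.Str.toList_join, PySem.Chars.join_singleton]
  | cons y xs ih =>
    intro x
    rw [List.foldl_cons, ← ih (x ++ " " ++ y), ← String.toList_inj]
    simp only [PySem.Str.toList_join, List.map_cons]
    have merge : ∀ (a b : List Char) (rest : List (List Char)),
        PySem.Chars.join " ".toList (a :: b :: rest)
          = PySem.Chars.join " ".toList ((a ++ " ".toList ++ b) :: rest) := by
      intro a b rest
      cases rest with
      | nil => simp [PySem.Chars.join_cons_cons, PySem.Chars.join_singleton]
      | cons z zs => simp [PySem.Chars.join_cons_cons]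
    rw [merge]
    simp [String.toList_append]

def pvUnl (l : String) : Bool := (pvSeverityLabel l).isNone

theorem pvBodyRest_eq (rest : List String) : ∀ body,
    pvBodyRest body rest = (body ++ rest.takeWhile pvUnl, rest.dropWhile pvUnl) := by
  induction rest with
  | nil => intro body; simp [pvBodyRest]
  | cons l ls ih =>
    intro body
    simp only [pvBodyRest, List.takeWhile_cons, List.dropWhile_cons, pvUnl]
    split_ifs with h <;> simp_all [pvUnl]

theorem pvSegsFrom_some (L : List String) : ∀ s d,
    pvSegsFrom (some (s, d)) L
      = (s, (L.takeWhile pvUnl).foldl (fun a b => a ++ " " ++ b) d)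
          :: pvSegsFrom none (L.dropWhile pvUnl) := by
  induction L with
  | nil => intro s d; simp [pvSegsFrom]
  | cons l L ih =>
    intro s d
    cases hl : pvSeverityLabel l with
    | some sev =>
      have hu : pvUnl l = false := by simp [pvUnl, hl]
      simp [pvSegsFrom, hl, List.takeWhile_cons, List.dropWhile_cons, hu]
    | none =>
      have hu : pvUnl l = true := by simp [pvUnl, hl]
      simp [pvSegsFrom, hl, List.takeWhile_cons, List.dropWhile_cons, hu, ih]

theorem pvDropPre_head_labeled : ∀ (L : List String) (l : String) (ls : List String),
    pvDropPre L = l :: ls → (pvSeverityLabel l).isNone = false := by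
  intro L
  induction L with
  | nil => intro l ls h; simp [pvDropPre] at h
  | cons a L ih =>
    intro l ls h
    by_cases ha : (pvSeverityLabel a).isNone = true
    · simp only [pvDropPre, if_pos ha] at h
      exact ih _ _ h
    · simp only [pvDropPre, if_neg ha] at h
      cases h
      exact Bool.eq_false_iff.mpr ha

theorem pvSegsFrom_none_eq_segments (L : List String) : pvSegsFrom none L = pvSegments L := by
  induction hn : L.length using Nat.strong_induction_on generalizing L with
  | _ n ih =>
    rw [pvSegments]
    have hdl := pvDropPre_length_le L
    -- first: skipping the preamble does not change the segments
    have skip : pvSegsFrom none L = pvSegsFrom none (pvDropPre L) := by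
      clear hdl hn ih
      induction L with
      | nil => rfl
      | cons l L ihL =>
        cases hl : pvSeverityLabel l with
        | some sev => simp [pvDropPre, hl, Option.isNone]
        | none => simp [pvSegsFrom, pvDropPre, hl, Option.isNone, ihL]
    rw [skip]
    cases hd : pvDropPre L with
    | nil => simp [pvSegsFrom]
    | cons l ls =>
      have hlab : (pvSeverityLabel l).isNone = false := pvDropPre_head_labeled L l ls hd
      cases hl : pvSeverityLabel l with
      | none => simp [hl] at hlab
      | some sev =>
        rw [hd] at hdl
        have hrec : pvSegsFrom none (ls.dropWhile pvUnl) = pvSegments (ls.dropWhile pvUnl) := by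
          have hlen : (ls.dropWhile pvUnl).length < n := by
            have := List.length_dropWhile_le (p := pvUnl) (l := ls)
            simp at hdl; omega
          exact ih _ hlen _ rfl
        simp only [pvSegsFrom, hl, Option.toList, pvBodyRest_eq, pvSegsFrom_some, hrec]
        simp [pvStrJoinFold]

theorem parse_eq_five (text : String) :
    parse_findings_from_text_py text
      = (PySem.List.enumerate
          (pvSegsFrom none (((PySem.Str.split? text "\n").getD []).map PySem.Str.strip))).map
          (fun p => pvFive p.1 p.2) := by
  have fe : pvAStep = fun st y => pvCleanStep st (PySem.Str.strip y) :=
    funext fun st => funext fun y => pvAStep_eq st y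
  have main : ∀ lines : List String,
      ((PySem.List.enumerate
          (if (List.foldl pvAStep ([], PySem.Dict.empty) lines).2.size ≠ 0
           then (List.foldl pvAStep ([], PySem.Dict.empty) lines).1 ++
                  [(List.foldl pvAStep ([], PySem.Dict.empty) lines).2]
           else (List.foldl pvAStep ([], PySem.Dict.empty) lines).1)).map pvAMeta).map (·.items)
        = (PySem.List.enumerate (pvSegsFrom none (lines.map PySem.Str.strip))).map
            (fun p => pvFive p.1 p.2) := by
    intro lines
    have hf : List.foldl pvAStep ([], PySem.Dict.empty) lines
        = List.foldl pvCleanStep (([] : List (String × String)).map pvDictOf, pvOcur none)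
            (lines.map PySem.Str.strip) := by
      rw [fe, List.foldl_map]
      simp [pvOcur]
    rw [hf, pvFoldA]
    simp only [List.nil_append, pvEnumerate_map, List.map_map]
    apply List.map_congr_left
    intro p _
    simp [Function.comp, pvAMeta_items]
  unfold parse_findings_from_text_py
  exact main _

-- ===== VERDICT (by name: the statement is the Claim_ definition above) =====
theorem parse_findings_from_text_py_spec : Claim_equal_parse_findings_from_text_py := by
  intro text _
  unfold Spec_parse_findings_from_text_py
  rw [parse_eq_five, pvSegsFrom_none_eq_segments]
  rfl
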